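-- pv_equiv track=rewrite | github.com/mateozorzi/TDA | ej2025/greedy/ej9_deadline.py | minimizar_latencia
-- ===== SOURCE A (Python) =====
-- def minimizar_latencia(L_deadline, T_tareas):
--     if len(T_tareas) == 0:
--         return []
--
--     tiempo = 0
--
--     tarea_deadline = []
--     for i in range(len(T_tareas)):
--         tarea = []
--         tarea.append(T_tareas[i])
--         tarea.append(L_deadline[i])
--         tarea_deadline.append(tarea)
--
--     tarea_deadline = sorted(tarea_deadline, key=lambda x:x[1]) #ordeno por las tareas que tengan un deadline mas corto
--     orden = []
--
--
--     for i in range(len(tarea_deadline)):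
--         latencia = 0
--         tiempo += tarea_deadline[i][0]
--         if tiempo > tarea_deadline[i][1]:
--             latencia += (tiempo-tarea_deadline[i][1])
--         orden.append((tarea_deadline[i][0], latencia))
--
--     return orden
-- ===== SOURCE B (Python) =====
-- def minimizar_latencia(L_deadline, T_tareas):
--     pares = list(zip(T_tareas, L_deadline))
--
--     def qsort(ps):
--         # stable three-way quicksort by deadline: order inside each part is preserved
--         if len(ps) <= 1:
--             return ps
--         piv = ps[len(ps) // 2][1]
--         menores = [p for p in ps if p[1] < piv]
--         iguales = [p for p in ps if p[1] == piv]
--         mayores = [p for p in ps if piv < p[1]]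
--         return qsort(menores) + iguales + qsort(mayores)
--
--     ordenadas = qsort(pares)
--     # back-to-front latency pass: walk the schedule reversed, starting from the
--     # total completion time and subtracting each task's time
--     tiempo = sum(t for t, _ in ordenadas)
--     orden = []
--     for t, d in reversed(ordenadas):
--         orden.append((t, tiempo - d if tiempo > d else 0))
--         tiempo -= t
--     orden.reverse()
--     return orden
-- ===== Notes on version B (the rewrite author's own statement) =====
-- stated objective: alternative
-- what changed: B replaces the built-in stable sort plus forward stateful loop by a hand-written stable three-way quicksort (filter-partition around the middle element's deadline) and a back-to-front latency pass that starts from the total completion time and subtracts task times.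
import Mathlib
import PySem

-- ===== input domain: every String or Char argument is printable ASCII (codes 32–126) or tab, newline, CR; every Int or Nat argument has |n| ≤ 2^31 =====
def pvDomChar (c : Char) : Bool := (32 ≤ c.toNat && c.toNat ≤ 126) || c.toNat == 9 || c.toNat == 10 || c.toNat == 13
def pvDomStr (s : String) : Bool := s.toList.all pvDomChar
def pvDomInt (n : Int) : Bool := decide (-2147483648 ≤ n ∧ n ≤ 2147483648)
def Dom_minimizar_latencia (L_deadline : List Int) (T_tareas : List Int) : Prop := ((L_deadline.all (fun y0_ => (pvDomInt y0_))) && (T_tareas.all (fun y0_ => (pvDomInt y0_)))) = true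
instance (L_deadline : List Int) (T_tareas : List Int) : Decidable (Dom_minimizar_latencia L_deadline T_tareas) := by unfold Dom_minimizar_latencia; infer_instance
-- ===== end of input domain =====

-- B replaces the built-in stable sort + forward stateful loop by a hand-written stable
-- three-way quicksort and a back-to-front latency pass; objective: alternative, same result.

-- ===== PORT A =====
def minimizar_latencia (L_deadline : List Int) (T_tareas : List Int) : List (Int × Int) :=
  if T_tareas.length = 0 then []
  else
    -- for i in range(len(T_tareas)): tarea_deadline.append([T_tareas[i], L_deadline[i]])
    let tarea_deadline := (PySem.List.pyRange 0 (T_tareas.length : Int) 1).foldl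
      (fun acc i => acc ++ [(PySem.List.pyGetD T_tareas i 0, PySem.List.pyGetD L_deadline i 0)]) []
    let tdSorted := PySem.List.sorted tarea_deadline (fun x => x.2) false
    (tdSorted.foldl
      (fun (st : Int × List (Int × Int)) p =>
        let tiempo := st.1 + p.1
        let latencia : Int := if tiempo > p.2 then 0 + (tiempo - p.2) else 0
        (tiempo, st.2 ++ [(p.1, latencia)]))
      (0, [])).2

-- ===== PORT B =====
-- piv = ps[len(ps) // 2][1]
def pvPiv (ps : List (Int × Int)) : Int :=
  (PySem.List.pyGetD ps (PySem.Int.floordiv (ps.length : Int) 2) (0, 0)).2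

theorem pvPiv_mem (ps : List (Int × Int)) (h : ps ≠ []) : ∃ x ∈ ps, x.2 = pvPiv ps := by
  have h0 : 0 < ps.length := List.length_pos_iff.mpr h
  have hlt : ps.length / 2 < ps.length := Nat.div_lt_self h0 (by norm_num)
  have hcast : PySem.Int.floordiv (ps.length : Int) 2 = ((ps.length / 2 : Nat) : Int) := by
    exact_mod_cast PySem.Int.floordiv_natCast ps.length 2
  have hv : pvPiv ps = ps[ps.length / 2].2 := by
    unfold pvPiv
    rw [hcast, PySem.List.pyGetD_natCast, List.getD_eq_getElem?_getD,
      List.getElem?_eq_getElem hlt]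
    rfl
  exact ⟨ps[ps.length / 2], List.getElem_mem _, hv.symm⟩

-- menores / iguales / mayores: the three order-preserving parts around the pivot
def pvMenores (ps : List (Int × Int)) : List (Int × Int) :=
  ps.filter (fun p => decide (p.2 < pvPiv ps))
def pvIguales (ps : List (Int × Int)) : List (Int × Int) :=
  ps.filter (fun p => decide (p.2 = pvPiv ps))
def pvMayores (ps : List (Int × Int)) : List (Int × Int) :=
  ps.filter (fun p => decide (pvPiv ps < p.2))

theorem pvQsort_dec_lt (ps : List (Int × Int)) (h : ps ≠ []) :
    (pvMenores ps).length < ps.length := by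
  obtain ⟨x, hx, he⟩ := pvPiv_mem ps h
  exact List.length_filter_lt_length_iff_exists.mpr ⟨x, hx, by simp [he]⟩

theorem pvQsort_dec_gt (ps : List (Int × Int)) (h : ps ≠ []) :
    (pvMayores ps).length < ps.length := by
  obtain ⟨x, hx, he⟩ := pvPiv_mem ps h
  exact List.length_filter_lt_length_iff_exists.mpr ⟨x, hx, by simp [he]⟩

-- stable three-way quicksort by deadline
def pvQsort (ps : List (Int × Int)) : List (Int × Int) :=
  if h : ps.length ≤ 1 then ps
  else pvQsort (pvMenores ps) ++ pvIguales ps ++ pvQsort (pvMayores ps)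
termination_by ps.length
decreasing_by
  · exact pvQsort_dec_lt ps (by intro e; simp [e] at h)
  · exact pvQsort_dec_gt ps (by intro e; simp [e] at h)

def minimizar_latencia_alt (L_deadline : List Int) (T_tareas : List Int) : List (Int × Int) :=
  let pares := T_tareas.zip L_deadline
  let ordenadas := pvQsort pares
  let tiempo0 := (ordenadas.map Prod.fst).sum
  -- for t, d in reversed(ordenadas): orden.append(...); tiempo -= t  — then orden.reverse()
  (ordenadas.reverse.foldl
    (fun (st : Int × List (Int × Int)) p =>
      (st.1 - p.1, st.2 ++ [(p.1, if st.1 > p.2 then st.1 - p.2 else 0)]))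
    (tiempo0, [])).2.reverse

-- ===== PRECONDITION & SPEC =====
-- A indexes L_deadline[i] for every i < len(T_tareas): when T_tareas is longer, A raises IndexError.
def Pre_minimizar_latencia (L_deadline : List Int) (T_tareas : List Int) : Prop :=
  T_tareas.length ≤ L_deadline.length
instance (L_deadline : List Int) (T_tareas : List Int) : Decidable (Pre_minimizar_latencia L_deadline T_tareas) := by unfold Pre_minimizar_latencia; infer_instance

def pvWitness_minimizar_latencia : List Int × List Int := ([3, 1, 4], [2, 1, 2])

def Spec_minimizar_latencia (L_deadline : List Int) (T_tareas : List Int) (out : List (Int × Int)) : Prop := out = minimizar_latencia_alt L_deadline T_tareas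
instance (L_deadline : List Int) (T_tareas : List Int) (out : List (Int × Int)) : Decidable (Spec_minimizar_latencia L_deadline T_tareas out) := by unfold Spec_minimizar_latencia; infer_instance

-- ===== CLAIM (what is proved, stated in full; the proofs are below) =====
def Claim_equal_minimizar_latencia : Prop := ∀ (L_deadline : List Int) (T_tareas : List Int), Dom_minimizar_latencia L_deadline T_tareas → Pre_minimizar_latencia L_deadline T_tareas → Spec_minimizar_latencia L_deadline T_tareas (minimizar_latencia L_deadline T_tareas)

-- ===== LEMMAS AND PROOFS =====

-- A's pair-building loop produces exactly T.zip L when T is not longer than L.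
theorem pvBuild_eq_zip (L T : List Int) (h : T.length ≤ L.length) :
    (PySem.List.pyRange 0 (T.length : Int) 1).foldl
      (fun acc i => acc ++ [(PySem.List.pyGetD T i 0, PySem.List.pyGetD L i 0)]) []
    = T.zip L := by
  rw [PySem.List.foldl_append_singleton_eq_map]
  rw [PySem.List.pyRange_one]
  simp only [zero_add, Int.sub_zero, Int.toNat_natCast, List.map_map, List.nil_append]
  apply List.ext_getElem
  · simp only [List.length_map, List.length_range, List.length_zip]; omega
  · intro k hk _
    simp only [List.getElem_map, List.getElem_range, Function.comp]
    have hkT : k < T.length := by simpa using hk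
    have hkL : k < L.length := by omega
    rw [PySem.List.pyGetD_natCast, PySem.List.pyGetD_natCast]
    simp [List.getElem_zip, List.getD_eq_getElem?_getD, hkT, hkL]

-- inserting x walks past a prefix none of whose elements x goes before
theorem pvIns_append_left {α : Type} (bef : α → α → Bool) (x : α) (l r : List α)
    (h : ∀ y ∈ l, bef x y = false) :
    PySem.List.insertBy bef x (l ++ r) = l ++ PySem.List.insertBy bef x r := by
  induction l with
  | nil => simp
  | cons a l ih =>
    have ha : bef x a = false := h a (by simp)
    simp only [List.cons_append, PySem.List.insertBy, ha]
    simp only [Bool.false_eq_true, if_false, List.cons.injEq, true_and]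
    exact ih (fun y hy => h y (by simp [hy]))

-- inserting x stops no later than the boundary when x goes before everything in the suffix
theorem pvIns_append_right {α : Type} (bef : α → α → Bool) (x : α) (l r : List α)
    (h : ∀ y ∈ r, bef x y = true) :
    PySem.List.insertBy bef x (l ++ r) = PySem.List.insertBy bef x l ++ r := by
  induction l with
  | nil =>
    cases r with
    | nil => simp
    | cons y r' => simp [PySem.List.insertBy, h y (by simp)]
  | cons a l ih =>
    by_cases ha : bef x a = true
    · simp [PySem.List.insertBy, ha]
    · simp only [List.cons_append, PySem.List.insertBy, ha]
      simp only [Bool.false_eq_true, if_false]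
      rw [List.cons_append, ih]

-- stable insertion sort splits around any pivot value into the three stable parts
theorem pvSorted_partition (xs : List (Int × Int)) (v : Int) :
    PySem.List.sorted xs (fun p => p.2) false =
      PySem.List.sorted (xs.filter (fun p => decide (p.2 < v))) (fun p => p.2) false
        ++ xs.filter (fun p => decide (p.2 = v))
        ++ PySem.List.sorted (xs.filter (fun p => decide (v < p.2))) (fun p => p.2) false := by
  induction xs using List.reverseRecOn with
  | nil => simp [PySem.List.sorted]
  | append_singleton xs x ih =>
    have hsnoc : ∀ (ys : List (Int × Int)),
        PySem.List.sorted (ys ++ [x]) (fun p => p.2) false =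
          PySem.List.insertBy (fun a b => decide (a.2 < b.2)) x
            (PySem.List.sorted ys (fun p => p.2) false) := by
      intro ys
      rw [PySem.List.sorted_eq_foldl_insertBy, PySem.List.sorted_eq_foldl_insertBy,
        List.foldl_append]
      rfl
    have hmemlt : ∀ y ∈ PySem.List.sorted (xs.filter (fun p => decide (p.2 < v)))
        (fun p => p.2) false, y.2 < v := by
      intro y hy
      have := (PySem.List.mem_sorted _ _ _ _).mp hy
      simpa using (List.of_mem_filter this)
    have hmemeq : ∀ y ∈ xs.filter (fun p => decide (p.2 = v)), y.2 = v := by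
      intro y hy; simpa using (List.of_mem_filter hy)
    have hmemgt : ∀ y ∈ PySem.List.sorted (xs.filter (fun p => decide (v < p.2)))
        (fun p => p.2) false, v < y.2 := by
      intro y hy
      have := (PySem.List.mem_sorted _ _ _ _).mp hy
      simpa using (List.of_mem_filter this)
    rcases lt_trichotomy x.2 v with hx | hx | hx
    · have hf1 : (xs ++ [x]).filter (fun p => decide (p.2 < v))
          = xs.filter (fun p => decide (p.2 < v)) ++ [x] := by
        simp [List.filter_append, hx]
      have hf2 : (xs ++ [x]).filter (fun p => decide (p.2 = v))
          = xs.filter (fun p => decide (p.2 = v)) := by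
        simp [List.filter_append]; omega
      have hf3 : (xs ++ [x]).filter (fun p => decide (v < p.2))
          = xs.filter (fun p => decide (v < p.2)) := by
        simp [List.filter_append]; omega
      rw [hsnoc, ih, hf1, hf2, hf3, hsnoc, List.append_assoc,
        pvIns_append_right _ _ _ _ ?hr, List.append_assoc]
      case hr =>
        intro y hy
        rcases List.mem_append.mp hy with hy | hy
        · have := hmemeq y hy; simp; omega
        · have := hmemgt y hy; simp; omega
    · have hf1 : (xs ++ [x]).filter (fun p => decide (p.2 < v))
          = xs.filter (fun p => decide (p.2 < v)) := by
        simp [List.filter_append]; omega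
      have hf2 : (xs ++ [x]).filter (fun p => decide (p.2 = v))
          = xs.filter (fun p => decide (p.2 = v)) ++ [x] := by
        simp [List.filter_append, hx]
      have hf3 : (xs ++ [x]).filter (fun p => decide (v < p.2))
          = xs.filter (fun p => decide (v < p.2)) := by
        simp [List.filter_append]; omega
      rw [hsnoc, ih, hf1, hf2, hf3, List.append_assoc,
        pvIns_append_left _ _ _ _ (fun y hy => by have := hmemlt y hy; simp; omega),
        pvIns_append_left _ _ _ _ (fun y hy => by have := hmemeq y hy; simp; omega)]
      have hins : PySem.List.insertBy (fun a b => decide (a.2 < b.2)) x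
          (PySem.List.sorted (xs.filter (fun p => decide (v < p.2))) (fun p => p.2) false)
          = x :: PySem.List.sorted (xs.filter (fun p => decide (v < p.2))) (fun p => p.2) false := by
        have := pvIns_append_right (fun a b : Int × Int => decide (a.2 < b.2)) x []
          (PySem.List.sorted (xs.filter (fun p => decide (v < p.2))) (fun p => p.2) false)
          (fun y hy => by have := hmemgt y hy; simp; omega)
        simpa [PySem.List.insertBy] using this
      rw [hins]
      simp
    · have hf1 : (xs ++ [x]).filter (fun p => decide (p.2 < v))
          = xs.filter (fun p => decide (p.2 < v)) := by
        simp [List.filter_append]; omega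
      have hf2 : (xs ++ [x]).filter (fun p => decide (p.2 = v))
          = xs.filter (fun p => decide (p.2 = v)) := by
        simp [List.filter_append]; omega
      have hf3 : (xs ++ [x]).filter (fun p => decide (v < p.2))
          = xs.filter (fun p => decide (v < p.2)) ++ [x] := by
        simp [List.filter_append, hx]
      rw [hsnoc, ih, hf1, hf2, hf3, hsnoc, List.append_assoc,
        pvIns_append_left _ _ _ _ (fun y hy => by have := hmemlt y hy; simp; omega),
        pvIns_append_left _ _ _ _ (fun y hy => by have := hmemeq y hy; simp; omega),
        List.append_assoc]

-- B's quicksort computes the stable sort by deadline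
theorem pvQsort_eq_sorted (ps : List (Int × Int)) :
    pvQsort ps = PySem.List.sorted ps (fun p => p.2) false := by
  induction ps using pvQsort.induct with
  | case1 ps h =>
    rw [pvQsort, dif_pos h]
    match ps, h with
    | [], _ => simp [PySem.List.sorted]
    | [a], _ => simp [PySem.List.sorted, PySem.List.insertBy]
  | case2 ps h ih1 ih2 =>
    rw [pvQsort, dif_neg h, ih1, ih2]
    simp only [pvMenores, pvIguales, pvMayores]
    rw [← pvSorted_partition]

-- the forward latency schedule (A's loop, as a structural recursion)
def pvFwd (s : Int) : List (Int × Int) → List (Int × Int)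
  | [] => []
  | p :: ps => (p.1, if s + p.1 > p.2 then s + p.1 - p.2 else 0) :: pvFwd (s + p.1) ps

-- A's stateful loop is the forward schedule
theorem pvLoopA_eq_fwd (xs : List (Int × Int)) (s : Int) (acc : List (Int × Int)) :
    (xs.foldl
      (fun (st : Int × List (Int × Int)) p =>
        let tiempo := st.1 + p.1
        let latencia : Int := if tiempo > p.2 then 0 + (tiempo - p.2) else 0
        (tiempo, st.2 ++ [(p.1, latencia)]))
      (s, acc)).2 = acc ++ pvFwd s xs := by
  induction xs generalizing s acc with
  | nil => simp [pvFwd]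
  | cons p ps ih =>
    simp only [List.foldl_cons, pvFwd]
    rw [ih]
    have : (0 : Int) + (s + p.1 - p.2) = s + p.1 - p.2 := by omega
    simp [this]

-- B's reversed loop, started at the total completion time, is the reversed forward schedule
theorem pvLoopB_eq_fwd (xs : List (Int × Int)) (s : Int) (acc : List (Int × Int)) :
    (xs.reverse.foldl
      (fun (st : Int × List (Int × Int)) p =>
        (st.1 - p.1, st.2 ++ [(p.1, if st.1 > p.2 then st.1 - p.2 else 0)]))
      (s + (xs.map Prod.fst).sum, acc))
    = (s, acc ++ (pvFwd s xs).reverse) := by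
  induction xs generalizing s acc with
  | nil => simp [pvFwd]
  | cons p ps ih =>
    simp only [List.reverse_cons, List.foldl_append, List.map_cons, List.sum_cons]
    have harith : s + (p.1 + (ps.map Prod.fst).sum) = (s + p.1) + (ps.map Prod.fst).sum := by
      omega
    rw [harith, ih (s + p.1) acc]
    simp only [List.foldl_cons, List.foldl_nil, pvFwd, List.reverse_cons]
    have h1 : s + p.1 - p.1 = s := by omega
    rw [h1, List.append_assoc]

-- ===== VERDICT (by name: the statement is the Claim_ definition above) =====
theorem minimizar_latencia_spec : Claim_equal_minimizar_latencia := by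
  intro L T _ hpre
  unfold Spec_minimizar_latencia
  by_cases hT : T.length = 0
  · have : T = [] := List.length_eq_zero_iff.mp hT
    subst this
    simp [minimizar_latencia, minimizar_latencia_alt, pvQsort]
  · simp only [minimizar_latencia, minimizar_latencia_alt, if_neg hT]
    rw [pvBuild_eq_zip L T hpre, pvLoopA_eq_fwd, pvQsort_eq_sorted]
    have hb := pvLoopB_eq_fwd (PySem.List.sorted (T.zip L) (fun p => p.2) false) 0 []
    simp only [zero_add] at hb
    rw [hb]
    simp
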